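-- pv_equiv track=rewrite | github.com/camclark/AdventOfCode | 2022/6/main.py | find_start_of_packet
-- ===== SOURCE A (Python) =====
-- def find_start_of_packet(data):
--     # Keep track of the last four characters seen
--     last_four = []
--
--     # Iterate through the data
--     for i, c in enumerate(data):
--         # Add the current character to the list of last four
--         last_four.append(c)
--         if len(last_four) > 4:
--             last_four.pop(0)
--
--         # Check if the last four characters are all different
--         if len(set(last_four)) == 4:
--             # Return the number of characters processed
--             return i + 1
-- ===== SOURCE B (Python) =====
-- def find_start_of_packet(data):
--     # Last-seen-index scan: `start` marks the beginning of the current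
--     # all-distinct run; no window list or per-step set() is built.
--     last_seen = {}
--     start = 0
--     for i, c in enumerate(data):
--         j = last_seen.get(c)
--         if j is not None and j >= start:
--             start = j + 1
--         last_seen[c] = i
--         if i - start + 1 == 4:
--             return i + 1
-- ===== Notes on version B (the rewrite author's own statement) =====
-- stated objective: faster
-- what changed: Replaces the maintained 4-element window list with per-step set() construction by a last-seen-index dict plus a run-start pointer, so each character is processed with O(1) dict work and no set is built.
import Mathlib
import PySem

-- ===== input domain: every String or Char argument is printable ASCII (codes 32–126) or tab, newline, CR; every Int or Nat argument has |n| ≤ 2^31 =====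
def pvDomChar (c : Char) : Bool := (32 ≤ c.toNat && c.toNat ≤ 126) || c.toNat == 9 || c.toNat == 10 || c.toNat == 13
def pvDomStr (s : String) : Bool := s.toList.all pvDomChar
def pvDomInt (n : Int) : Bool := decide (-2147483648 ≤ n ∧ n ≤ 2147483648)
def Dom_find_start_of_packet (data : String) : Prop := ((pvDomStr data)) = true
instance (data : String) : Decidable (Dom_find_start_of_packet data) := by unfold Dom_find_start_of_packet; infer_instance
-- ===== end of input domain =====

-- B replaces A's maintained 4-char window list (with a set built per step) by a
-- last-seen-index dict plus a run-start pointer: O(1) dict work per character, no set built.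

-- ===== PORT A =====
-- loop over enumerate(data), state: last_four window, index i
def pvGoA (cs : List Char) (i : Int) (last_four : List Char) : Option Int :=
  match cs with
  | [] => none
  | c :: rest =>
    let w1 := last_four ++ [c]
    -- last_four.pop(0): here len(w1) = 5 > 4 > 0, so pop(0) drops the head (exact)
    let w2 := if 4 < w1.length then w1.drop 1 else w1
    if PySem.Set.len (PySem.Set.ofList w2) == 4 then some (i + 1)
    else pvGoA rest (i + 1) w2

def find_start_of_packet (data : String) : Option Int :=
  pvGoA data.toList 0 []

-- ===== PORT B =====
-- loop over enumerate(data), state: last_seen dict, start pointer, index i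
def pvGoB (cs : List Char) (i : Int) (seen : PySem.Dict Char Int) (start : Int) : Option Int :=
  match cs with
  | [] => none
  | c :: rest =>
    let start1 :=
      match seen.get? c with           -- j = last_seen.get(c)
      | some j => if start ≤ j then j + 1 else start   -- if j is not None and j >= start
      | none => start
    let seen1 := seen.insert c i       -- last_seen[c] = i
    if i - start1 + 1 == 4 then some (i + 1)
    else pvGoB rest (i + 1) seen1 start1

def find_start_of_packet_alt (data : String) : Option Int :=
  pvGoB data.toList 0 PySem.Dict.empty 0

-- ===== PRECONDITION & SPEC =====
def Spec_find_start_of_packet (data : String) (out : Option Int) : Prop := out = find_start_of_packet_alt data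
instance (data : String) (out : Option Int) : Decidable (Spec_find_start_of_packet data out) := by unfold Spec_find_start_of_packet; infer_instance

-- ===== CLAIM (what is proved, stated in full; the proofs are below) =====
def Claim_equal_find_start_of_packet : Prop := ∀ (data : String), Dom_find_start_of_packet data → Spec_find_start_of_packet data (find_start_of_packet data)

-- ===== LEMMAS AND PROOFS =====

-- pvDfr p = length of the longest duplicate-free prefix of p (p is the REVERSED processed prefix)
def pvDfr : List Char → Nat
  | [] => 0
  | c :: p =>
    match p.idxOf? c with
    | some k => 1 + min (pvDfr p) k
    | none => 1 + pvDfr p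

lemma pvDfr_cons_none (c : Char) (p : List Char) (h : p.idxOf? c = none) :
    pvDfr (c :: p) = 1 + pvDfr p := by simp [pvDfr, h]

lemma pvDfr_cons_some (c : Char) (p : List Char) (k : ℕ) (h : p.idxOf? c = some k) :
    pvDfr (c :: p) = 1 + min (pvDfr p) k := by simp [pvDfr, h]

lemma pvDfr_le_length (q : List Char) : pvDfr q ≤ q.length := by
  induction q with
  | nil => simp [pvDfr]
  | cons c p ih =>
    cases h : p.idxOf? c with
    | none => rw [pvDfr_cons_none c p h]; simp; omega
    | some k => rw [pvDfr_cons_some c p k h]; simp; omega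

lemma pvDfr_cons_le (c : Char) (p : List Char) : pvDfr (c :: p) ≤ pvDfr p + 1 := by
  cases h : p.idxOf? c with
  | none => rw [pvDfr_cons_none c p h]; omega
  | some k => rw [pvDfr_cons_some c p k h]; omega

lemma pv_idxOf?_cons (c c' : Char) (p : List Char) :
    (c :: p).idxOf? c' = if c = c' then some 0 else (p.idxOf? c').map (· + 1) := by
  simp [List.idxOf?, List.findIdx?_cons]

lemma pv_mem_take_iff (p : List Char) (c : Char) (k m : ℕ) (h : p.idxOf? c = some k) :
    c ∈ p.take m ↔ k < m := by
  induction p generalizing k m with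
  | nil => simp [List.idxOf?] at h
  | cons x xs ih =>
    rw [pv_idxOf?_cons] at h
    by_cases hx : x = c
    · simp [hx] at h
      cases m with
      | zero => simp [← h]
      | succ n => subst hx; simp [← h]
    · simp [hx] at h
      obtain ⟨k', hk', rfl⟩ := h
      cases m with
      | zero => simp
      | succ n =>
        simp [List.take_succ_cons, List.mem_cons, Ne.symm hx, ih _ _ hk']

lemma pv_idx_lt_length (p : List Char) (c : Char) (k : ℕ) (h : p.idxOf? c = some k) :
    k < p.length := by
  have hmem : c ∈ p := by
    by_contra hc
    rw [List.idxOf?_eq_none_iff.mpr hc] at h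
    simp at h
  exact (pv_mem_take_iff p c k p.length h).mp (by simpa using hmem)

lemma pv_nodup_take_pvDfr (q : List Char) : (q.take (pvDfr q)).Nodup := by
  induction q with
  | nil => simp
  | cons c p ih =>
    cases h : p.idxOf? c with
    | none =>
      have hc : c ∉ p := List.idxOf?_eq_none_iff.mp h
      have : c ∉ p.take (pvDfr p) := fun hm => hc (List.mem_of_mem_take hm)
      rw [pvDfr_cons_none c p h]
      simpa [Nat.add_comm, List.take_succ_cons] using ⟨this, ih⟩
    | some k =>
      have h1 : c ∉ p.take (min (pvDfr p) k) := by
        rw [pv_mem_take_iff p c k _ h]; omega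
      have h2 : (p.take (min (pvDfr p) k)).Nodup := by
        have he : p.take (min (pvDfr p) k) = (p.take (pvDfr p)).take k := by
          rw [List.take_take, Nat.min_comm]
        rw [he]
        exact (List.take_sublist _ _).nodup ih
      rw [pvDfr_cons_some c p k h]
      simpa [Nat.add_comm, List.take_succ_cons] using ⟨h1, h2⟩

lemma pv_le_pvDfr (q : List Char) (n : ℕ) (hn : (q.take n).Nodup) (hl : n ≤ q.length) :
    n ≤ pvDfr q := by
  induction q generalizing n with
  | nil => simp at hl; simp [hl]
  | cons c p ih =>
    cases n with
    | zero => omega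
    | succ m =>
      rw [List.take_succ_cons, List.nodup_cons] at hn
      have hm : m ≤ pvDfr p := ih m hn.2 (by simpa using hl)
      cases h : p.idxOf? c with
      | none => rw [pvDfr_cons_none c p h]; omega
      | some k =>
        have : ¬ k < m := fun hk => hn.1 ((pv_mem_take_iff p c k m h).mpr hk)
        rw [pvDfr_cons_some c p k h]; omega

lemma pv_dfr_ge_four (q : List Char) : 4 ≤ pvDfr q ↔ 4 ≤ q.length ∧ (q.take 4).Nodup := by
  constructor
  · intro h
    refine ⟨le_trans h (pvDfr_le_length q), ?_⟩
    have he : q.take 4 = (q.take (pvDfr q)).take 4 := by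
      rw [List.take_take, Nat.min_eq_left h]
    rw [he]
    exact (List.take_sublist _ _).nodup (pv_nodup_take_pvDfr q)
  · rintro ⟨hl, hn⟩
    have := pv_le_pvDfr q 4 hn (by omega)
    omega

-- |set(l)| = |l| iff l has no duplicates
lemma pv_card_eq_iff (l : List Char) : (PySem.Set.ofList l).length = l.length ↔ l.Nodup := by
  induction l using List.reverseRecOn with
  | nil => simp [PySem.Set.ofList_nil]
  | append_singleton xs x ih =>
    rw [PySem.Set.ofList_append_singleton, PySem.Set.add]
    have hle := PySem.Set.length_ofList_le (xs := xs)
    by_cases hx : x ∈ xs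
    · have hnd : ¬ (xs ++ [x]).Nodup := by
        simp [List.nodup_append]
        exact fun _ => hx
      simp only [show PySem.Set.contains (PySem.Set.ofList xs) x = true by simp [hx], if_true]
      refine iff_of_false (fun hlen => ?_) hnd
      simp at hlen; omega
    · simp only [show PySem.Set.contains (PySem.Set.ofList xs) x = false by simp [hx], Bool.false_eq_true, if_false]
      simp [List.nodup_append, ih]
      intro _ a ha he; exact hx (he ▸ ha)

-- A's test on the window of the last ≤4 chars equals "longest distinct run = 4"
lemma pv_window_test (q : List Char) (hd : pvDfr q ≤ 4) :
    ((PySem.Set.ofList ((q.take 4).reverse)).length = 4) ↔ pvDfr q = 4 := by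
  set w := (q.take 4).reverse with hw
  have hwlen : w.length = min 4 q.length := by simp [hw]
  constructor
  · intro h
    have hle := PySem.Set.length_ofList_le (xs := w)
    have hw4 : w.length = 4 := by omega
    have hnd : w.Nodup := (pv_card_eq_iff w).mp (by omega)
    have : 4 ≤ pvDfr q := by
      rw [pv_dfr_ge_four]
      exact ⟨by omega, by simpa [hw] using hnd⟩
    omega
  · intro h
    have h4 : 4 ≤ pvDfr q := by omega
    rw [pv_dfr_ge_four] at h4
    have hnd : w.Nodup := by simpa [hw] using h4.2
    rw [PySem.Set.ofList_eq_self_of_nodup w hnd]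
    omega

-- A's window update keeps the invariant "window = reversed (take 4 of the reversed prefix)"
lemma pv_window_step (c : Char) (p : List Char) :
    (if 4 < ((p.take 4).reverse ++ [c]).length then ((p.take 4).reverse ++ [c]).drop 1
     else (p.take 4).reverse ++ [c]) = ((c :: p).take 4).reverse := by
  match p with
  | [] => rfl
  | [a] => rfl
  | [a, b] => rfl
  | [a, b, d] => rfl
  | a :: b :: d :: e :: t => simp

-- Main coupling invariant: with i = |p| processed chars (p reversed), A's window,
-- B's last_seen dict and B's start pointer stay in sync and fire together.
lemma pv_main (cs : List Char) (p : List Char) (seen : PySem.Dict Char Int) (start i : Int)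
    (hi : i = (p.length : Int))
    (hseen : ∀ c, seen.get? c = (p.idxOf? c).map (fun k => i - 1 - (k : Int)))
    (hstart : start = i - (pvDfr p : Int))
    (hdfr : pvDfr p ≤ 3) :
    pvGoA cs i ((p.take 4).reverse) = pvGoB cs i seen start := by
  induction cs generalizing p seen start i with
  | nil => simp [pvGoA, pvGoB]
  | cons c rest ih =>
    rw [pvGoA, pvGoB]
    simp only [pv_window_step c p]
    have hdl := pvDfr_le_length p
    -- B's new start = (i+1) - pvDfr (c::p)
    have hstart1 :
        (match seen.get? c with
         | some j => if start ≤ j then j + 1 else start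
         | none => start) = (i + 1) - (pvDfr (c :: p) : Nat) := by
      rw [hseen c]
      cases h : p.idxOf? c with
      | none =>
        rw [pvDfr_cons_none c p h]
        simp; omega
      | some k =>
        rw [pvDfr_cons_some c p k h]
        have hk := pv_idx_lt_length p c k h
        by_cases hg : start ≤ (i - 1 - (k : Int))
        · have hkd : k < pvDfr p := by omega
          rw [Nat.min_eq_right (by omega)]
          simp [hg]
          ring
        · have hkd : ¬ k < pvDfr p := by omega
          rw [Nat.min_eq_left (by omega)]
          simp [hg]; omega
    rw [hstart1]
    have hdc4 : pvDfr (c :: p) ≤ 4 := le_trans (pvDfr_cons_le c p) (by omega)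
    have hiff := pv_window_test (c :: p) hdc4
    by_cases h4 : pvDfr (c :: p) = 4
    · have hA : (PySem.Set.len (PySem.Set.ofList (((c :: p).take 4).reverse)) == (4 : Int)) = true := by
        simp only [PySem.Set.len]
        rw [beq_iff_eq]
        exact_mod_cast hiff.mpr h4
      have hB : ((i - ((i + 1) - (pvDfr (c :: p) : Nat)) + 1) == (4 : Int)) = true := by
        rw [beq_iff_eq]; omega
      rw [hA, hB]; simp
    · have hA : (PySem.Set.len (PySem.Set.ofList (((c :: p).take 4).reverse)) == (4 : Int)) = false := by
        simp only [PySem.Set.len]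
        rw [beq_eq_false_iff_ne]
        intro hc
        exact h4 (hiff.mp (by exact_mod_cast hc))
      have hB : ((i - ((i + 1) - (pvDfr (c :: p) : Nat)) + 1) == (4 : Int)) = false := by
        rw [beq_eq_false_iff_ne]; omega
      rw [hA, hB]
      simp only [Bool.false_eq_true, if_false]
      apply ih (c :: p)
      · simp [hi]
      · intro c'
        rw [PySem.Dict.get?_insert, pv_idxOf?_cons]
        by_cases hc : c' = c
        · simp [hc, hi]
        · rw [if_neg hc, if_neg (fun he => hc he.symm)]
          rw [hseen c']
          cases p.idxOf? c' with
          | none => simp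
          | some k => simp; ring
      · omega
      · omega

-- ===== VERDICT (by name: the statement is the Claim_ definition above) =====
theorem find_start_of_packet_spec : Claim_equal_find_start_of_packet := by
  intro data _
  unfold Spec_find_start_of_packet find_start_of_packet find_start_of_packet_alt
  have := pv_main data.toList [] PySem.Dict.empty 0 0 (by simp)
    (by intro c; simp [PySem.Dict.get?_empty, List.idxOf?]) (by simp [pvDfr]) (by simp [pvDfr])
  simpa using this
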